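-- pv_equiv track=rewrite | github.com/Gummy27/Prog | Assignment_16/top_chess_players_p1.py | create_countries_dict
-- ===== SOURCE A (Python) =====
-- COUNTRY = 1
--
-- def create_countries_dict(players_dict):
--     country_dict = {}
--     for player_name in players_dict:
--         country = players_dict[player_name][COUNTRY]
--
--         if country in country_dict:
--             country_dict[country].append(player_name)
--         else:
--             country_dict[country] = [player_name]
--
--     return country_dict
-- ===== SOURCE B (Python) =====
-- COUNTRY = 1
--
-- def create_countries_dict(players_dict):
--     countries = list(dict.fromkeys(v[COUNTRY] for v in players_dict.values()))
--     return {c: [name for name, v in players_dict.items() if v[COUNTRY] == c]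
--             for c in countries}
-- ===== Notes on version B (the rewrite author's own statement) =====
-- stated objective: alternative
-- what changed: Replaces A's single-pass dict accumulation (lookup-and-append per player) with a two-phase decomposition: an ordered dedup of the country values, then one filter pass per country building each group as a comprehension.
import Mathlib
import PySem

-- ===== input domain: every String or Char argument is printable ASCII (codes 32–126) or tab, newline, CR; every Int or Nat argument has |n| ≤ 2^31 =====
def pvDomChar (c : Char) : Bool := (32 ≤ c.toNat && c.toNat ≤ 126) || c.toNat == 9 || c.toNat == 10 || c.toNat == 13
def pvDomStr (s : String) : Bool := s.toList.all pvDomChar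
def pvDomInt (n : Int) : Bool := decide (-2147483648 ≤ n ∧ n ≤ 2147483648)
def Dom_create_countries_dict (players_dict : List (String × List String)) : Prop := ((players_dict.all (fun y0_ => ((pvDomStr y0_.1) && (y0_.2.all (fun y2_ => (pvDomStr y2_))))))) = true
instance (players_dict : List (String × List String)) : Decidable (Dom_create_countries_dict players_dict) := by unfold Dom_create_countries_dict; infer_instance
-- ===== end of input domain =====

-- B groups by a different decomposition: ordered dedup of the countries, then one filter pass per country,
-- instead of A's single-pass dict accumulation; objective: alternative (not faster).

-- ===== PORT A =====
-- literal port: iterate the dict's keys, look the value up in the dict, index it at 1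
-- (pyGetD with dummy "" is total; Pre_ guarantees the index is in range and the lookup hits the pair itself)
def create_countries_dict (players_dict : List (String × List String)) : List (String × List String) :=
  (players_dict.foldl
    (fun country_dict p =>
      let country := PySem.List.pyGetD ((PySem.Dict.mk players_dict).getD p.1 []) 1 ""
      if country_dict.contains country then
        country_dict.modify country [] (fun l => l ++ [p.1])
      else
        country_dict.insert country [p.1])
    PySem.Dict.empty).items

-- ===== PORT B =====
def create_countries_dict_alt (players_dict : List (String × List String)) : List (String × List String) :=
  let countries := PySem.List.dedup (players_dict.map (fun p => PySem.List.pyGetD p.2 1 ""))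
  countries.map (fun c =>
    (c, (players_dict.filter (fun p => PySem.List.pyGetD p.2 1 "" == c)).map (fun p => p.1)))

-- ===== PRECONDITION & SPEC =====
-- Pre_: keys distinct (a Python dict cannot carry duplicate keys) and every value list has at
-- least 2 elements — on shorter values A raises IndexError at value[COUNTRY].
def Pre_create_countries_dict (players_dict : List (String × List String)) : Prop :=
  (players_dict.map (fun p => p.1)).Nodup ∧ ∀ p ∈ players_dict, 2 ≤ p.2.length
instance (players_dict : List (String × List String)) : Decidable (Pre_create_countries_dict players_dict) := by unfold Pre_create_countries_dict; infer_instance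
def pvWitness_create_countries_dict : (List (String × List String)) :=
  [("Magnus Carlsen", ["2850", "Norway"]), ("Hikaru Nakamura", ["2780", "USA"])]
def Spec_create_countries_dict (players_dict : List (String × List String)) (out : List (String × List String)) : Prop := out = create_countries_dict_alt players_dict
instance (players_dict : List (String × List String)) (out : List (String × List String)) : Decidable (Spec_create_countries_dict players_dict out) := by unfold Spec_create_countries_dict; infer_instance

-- ===== CLAIM (what is proved, stated in full; the proofs are below) =====
def Claim_equal_create_countries_dict : Prop := ∀ (players_dict : List (String × List String)), Dom_create_countries_dict players_dict → Pre_create_countries_dict players_dict → Spec_create_countries_dict players_dict (create_countries_dict players_dict)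

-- ===== LEMMAS AND PROOFS =====

-- the country A computes for an entry p equals p.2[1] (nodup keys: the lookup hits p itself)
theorem pv_country_eq (l : List (String × List String))
    (hnd : (l.map (fun p => p.1)).Nodup) (p : String × List String) (hp : p ∈ l) :
    PySem.List.pyGetD ((PySem.Dict.mk l).getD p.1 []) 1 "" = PySem.List.pyGetD p.2 1 "" := by
  have hk : (PySem.Dict.mk l).keys.Nodup := hnd
  have : (PySem.Dict.mk l).get? p.1 = some p.2 :=
    PySem.Dict.get?_of_mem_items (PySem.Dict.mk l) hp hk
  rw [PySem.Dict.getD_eq_get?_getD, this]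
  rfl

-- A's branching step is exactly Dict.modify
theorem pv_step_eq_modify (d : PySem.Dict String (List String)) (c : String) (n : String) :
    (if d.contains c then d.modify c [] (fun l => l ++ [n]) else d.insert c [n])
      = d.modify c [] (fun l => l ++ [n]) := by
  by_cases h : d.contains c = true
  · simp [h]
  · simp only [Bool.not_eq_true] at h
    simp [h, PySem.Dict.modify, PySem.Dict.getD_of_not_contains d [] h]

theorem pv_filter_map (l : List (String × List String)) (c : String) :
    List.map (fun x => x.2) (List.filter (fun q => q.1 == c)
      (l.map (fun p => (PySem.List.pyGetD p.2 1 "", p.1))))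
      = (l.filter (fun p => PySem.List.pyGetD p.2 1 "" == c)).map (fun p => p.1) := by
  induction l with
  | nil => rfl
  | cons a t ih =>
      by_cases h : PySem.List.pyGetD a.2 1 "" == c <;> simp [List.filter, h, ih]

-- ===== VERDICT (by name: the statement is the Claim_ definition above) =====
theorem create_countries_dict_spec : Claim_equal_create_countries_dict := by
  intro l _ hpre
  obtain ⟨hnd, _⟩ := hpre
  unfold Spec_create_countries_dict create_countries_dict create_countries_dict_alt
  -- rewrite A's fold body: country = p.2[1], branch = modify
  have h1 : l.foldl
      (fun country_dict p =>
        let country := PySem.List.pyGetD ((PySem.Dict.mk l).getD p.1 []) 1 ""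
        if country_dict.contains country then
          country_dict.modify country [] (fun ls => ls ++ [p.1])
        else
          country_dict.insert country [p.1])
      PySem.Dict.empty
      = l.foldl
      (fun country_dict p =>
        country_dict.modify (PySem.List.pyGetD p.2 1 "") [] (fun ls => ls ++ [p.1]))
      PySem.Dict.empty := by
    apply PySem.List.foldl_congr_mem
    intro acc p hp
    simp only [pv_country_eq l hnd p hp, pv_step_eq_modify]
  rw [h1]
  -- the grouping fold, seen through its keys and lookups
  set f : (String × List String) → String := fun p => PySem.List.pyGetD p.2 1 "" with hf
  set D := l.foldl (fun d p => d.modify (f p) [] (fun ls => ls ++ [p.1])) PySem.Dict.empty with hD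
  have hkeys : D.keys = PySem.Set.ofList (l.map f) := by
    rw [hD]
    have := PySem.Dict.keys_foldl_modify_key l f [] (fun _ p => fun ls => ls ++ [p.1]) PySem.Dict.empty
    simpa [PySem.Set.update, PySem.Set.ofList] using this
  have hknd : D.keys.Nodup := by
    rw [hkeys]; exact PySem.Set.nodup_ofList _
  have hitems : D.items = D.keys.map (fun k => (k, D.getD k [])) :=
    PySem.Dict.items_eq_map_keys D hknd []
  rw [hitems, hkeys, PySem.List.dedup_eq_ofList]
  apply List.map_congr_left
  intro c _
  have hgd : D.getD c [] = List.map (fun x => x.2) (List.filter (fun q => q.1 == c)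
      (l.map (fun p => (f p, p.1)))) := by
    have h2 := PySem.Dict.getD_foldl_modify_append (l.map (fun p => (f p, p.1)))
      PySem.Dict.empty c
    rw [List.foldl_map] at h2
    rw [hD]
    simpa using h2
  rw [hgd, pv_filter_map]
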